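-- pv_equiv track=rewrite | github.com/asafs/videotoitunes | Convert.py | fix_one_line
-- ===== SOURCE A (Python) =====
-- def fix_one_line(s):
--     """
--     Fixes punctuation in one line.
--
--     :param s: the string to fix
--     :return: the fixed string
--     """
--     special_characters = '.,:;''()-?!+=*&$^%#@~`" /'
--     prefix = ''
--     suffix = ''
--
--     # get special chars from the beginning of the string
--     while len(s) > 0 and s[0] in special_characters:
--         prefix += s[0]
--         s = s[1:]
--
--     # get special chars at the end of the string
--     while len(s) > 0 and s[-1] in special_characters:
--         suffix += s[-1]
--         s = s[:-1]
--
--     if prefix == ' -':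
--         prefix = '- '
--     if suffix == ' -':
--         suffix = '- '
--
--     return suffix + s + prefix
-- ===== SOURCE B (Python) =====
-- def fix_one_line(s):
--     """
--     Fixes punctuation in one line.
--
--     :param s: the string to fix
--     :return: the fixed string
--     """
--     special = set('.,:;''()-?!+=*&$^%#@~`" /')
--     n = len(s)
--     i = 0
--     while i < n and s[i] in special:
--         i += 1
--     j = n
--     while j > i and s[j - 1] in special:
--         j -= 1
--     prefix = s[:i]
--     suffix = s[j:][::-1]
--     if prefix == ' -':
--         prefix = '- '
--     if suffix == ' -':
--         suffix = '- '
--     return suffix + s[i:j] + prefix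
-- ===== Notes on version B (the rewrite author's own statement) =====
-- stated objective: faster
-- what changed: A repeatedly slices the string (s=s[1:], s=s[:-1]) while copying chars one by one; B scans two indices over the unchanged string and builds prefix/core/suffix with three single slices.
import Mathlib
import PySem

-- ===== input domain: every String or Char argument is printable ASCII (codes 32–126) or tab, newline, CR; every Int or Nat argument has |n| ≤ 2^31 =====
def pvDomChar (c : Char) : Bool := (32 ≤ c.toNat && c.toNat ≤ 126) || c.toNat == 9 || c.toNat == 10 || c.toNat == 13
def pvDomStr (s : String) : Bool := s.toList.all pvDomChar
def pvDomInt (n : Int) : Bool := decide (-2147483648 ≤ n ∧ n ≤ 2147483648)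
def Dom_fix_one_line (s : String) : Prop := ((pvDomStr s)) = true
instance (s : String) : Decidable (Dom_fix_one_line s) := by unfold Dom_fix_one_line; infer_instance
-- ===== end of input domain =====

-- B replaces A's repeated O(n) slicing loops by index scans and single slices (O(n) total vs A's O(n^2)).


-- the Python literal '.,:;''()-?!+=*&$^%#@~`" /' (adjacent-literal concatenation; no apostrophe)
def pvSpec : List Char := ".,:;()-?!+=*&$^%#@~`\" /".toList

-- ===== PORT A =====
-- first while loop: eat special chars from the front, accumulating prefix
def pvStripFront : List Char → List Char → List Char × List Char
  | pre, [] => (pre, [])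
  | pre, c :: rest => if c ∈ pvSpec then pvStripFront (pre ++ [c]) rest else (pre, c :: rest)

-- second while loop: eat special chars from the back (s[-1], s = s[:-1]), accumulating suffix
def pvStripBack (suf : List Char) (s : List Char) : List Char × List Char :=
  match h : s.getLast? with
  | none => (suf, s)
  | some c =>
    if c ∈ pvSpec then pvStripBack (suf ++ [c]) s.dropLast else (suf, s)
termination_by s.length
decreasing_by
  cases s with
  | nil => simp at h
  | cons a t => simp [List.length_dropLast]

def fix_one_line (s : String) : String :=
  let (pre, s1) := pvStripFront [] s.toList
  let (suf, s2) := pvStripBack [] s1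
  let pre' := if pre = [' ', '-'] then ['-', ' '] else pre
  let suf' := if suf = [' ', '-'] then ['-', ' '] else suf
  String.ofList (suf' ++ s2 ++ pre')

-- ===== PORT B =====
-- i-loop of Source B: how many leading special chars
def pvFrontLen : List Char → Nat
  | [] => 0
  | c :: r => if c ∈ pvSpec then pvFrontLen r + 1 else 0

-- j-loop of Source B, read off the reversed remainder: the trailing special chars, already reversed
def pvTakeSpec : List Char → List Char
  | [] => []
  | c :: r => if c ∈ pvSpec then c :: pvTakeSpec r else []

def fix_one_line_alt (s : String) : String :=
  let cs := s.toList
  let i := pvFrontLen cs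
  let pre := cs.take i
  let rrev := (cs.drop i).reverse
  let suf := pvTakeSpec rrev
  let core := (rrev.drop suf.length).reverse
  let pre' := if pre = [' ', '-'] then ['-', ' '] else pre
  let suf' := if suf = [' ', '-'] then ['-', ' '] else suf
  String.ofList (suf' ++ core ++ pre')

-- ===== PRECONDITION & SPEC =====
def Spec_fix_one_line (s : String) (out : String) : Prop := out = fix_one_line_alt s
instance (s : String) (out : String) : Decidable (Spec_fix_one_line s out) := by unfold Spec_fix_one_line; infer_instance

-- ===== CLAIM (what is proved, stated in full; the proofs are below) =====
def Claim_equal_fix_one_line : Prop := ∀ (s : String), Dom_fix_one_line s → Spec_fix_one_line s (fix_one_line s)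

-- ===== LEMMAS AND PROOFS =====
theorem pvStripFront_eq (cs : List Char) : ∀ pre,
    pvStripFront pre cs = (pre ++ cs.take (pvFrontLen cs), cs.drop (pvFrontLen cs)) := by
  induction cs with
  | nil => intro pre; simp [pvStripFront, pvFrontLen]
  | cons c rest ih =>
    intro pre
    by_cases h : c ∈ pvSpec
    · simp [pvStripFront, pvFrontLen, h, ih]
    · simp [pvStripFront, pvFrontLen, h]

theorem pvStripBack_eq (cs : List Char) : ∀ suf,
    pvStripBack suf cs =
      (suf ++ pvTakeSpec cs.reverse,
       (cs.reverse.drop (pvTakeSpec cs.reverse).length).reverse) := by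
  induction cs using List.reverseRecOn with
  | nil => intro suf; simp [pvStripBack, pvTakeSpec]
  | append_singleton l c ih =>
    intro suf
    rw [pvStripBack]
    split
    · next heq => simp at heq
    · next c' heq =>
      have hc : c = c' := by simpa using heq
      subst hc
      by_cases h : c ∈ pvSpec
      · simp [h, ih, pvTakeSpec]
      · simp [h, pvTakeSpec]

-- ===== VERDICT (by name: the statement is the Claim_ definition above) =====
theorem fix_one_line_spec : Claim_equal_fix_one_line := by
  intro s _
  unfold Spec_fix_one_line fix_one_line fix_one_line_alt
  simp [pvStripFront_eq, pvStripBack_eq]
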